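-- pv_equiv track=rewrite | github.com/Will-Raymond/human_riboswitch_hits | rs_functions.py | __generate_seperate_substrings
-- ===== SOURCE A (Python) =====
-- def __generate_seperate_substrings(cleaned_string, all_bracket_pairs):
--     substrings = []
--
--     for j in range(len(all_bracket_pairs)):
--         if len(all_bracket_pairs[j]) > 0:
--             substring = cleaned_string
--             for i in range(len(all_bracket_pairs)):
--                 if i != j:
--                     pair = all_bracket_pairs[i]
--                     substring = substring.replace(pair[0],'.').replace(pair[1],'.')
--
--             substring  = substring.replace(all_bracket_pairs[j][0],'(').replace(all_bracket_pairs[j][1],')')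
--             substrings = substrings + [substring,]
--
--
--     return substrings
-- ===== SOURCE B (Python) =====
-- def __generate_seperate_substrings(cleaned_string, all_bracket_pairs):
--     # Compose the single-char replacements into char-to-char maps over a small
--     # alphabet, with prefix/suffix compositions shared across all passes, then
--     # render each substring in one pass: O(k*(d+n)) instead of A's O(k^2*n).
--     js = [j for j in range(len(all_bracket_pairs)) if len(all_bracket_pairs[j]) > 0]
--     if not js:
--         return []
--     # closed alphabet: chars of the string plus the replacement targets
--     domain = list(dict.fromkeys(cleaned_string + '.()'))
--     ident = {c: c for c in domain}
--
--     def step(m, a, b):  # append one replacement pass to a composed map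
--         return {k: (b if v == a else v) for k, v in m.items()}
--
--     def mask(m, p):     # append the two '.'-masking passes of pair p
--         return step(step(m, p[0], '.'), p[1], '.')
--
--     n = len(all_bracket_pairs)
--     prefix = [ident]    # prefix[j] = masking of pairs 0..j-1, composed
--     for p in all_bracket_pairs:
--         prefix.append(mask(prefix[-1], p))
--     suffix = [None] * (n + 1)   # suffix[j] = masking of pairs j..n-1, composed
--     suffix[n] = ident
--     for j in range(n - 1, -1, -1):
--         p = all_bracket_pairs[j]
--         x = suffix[j + 1]
--         suffix[j] = {c: x['.' if ('.' if c == p[0] else c) == p[1] else ('.' if c == p[0] else c)] for c in domain}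
--
--     out = []
--     for j in js:
--         pj = all_bracket_pairs[j]
--         comp = {c: suffix[j + 1][prefix[j][c]] for c in domain}
--         comp = step(step(comp, pj[0], '('), pj[1], ')')
--         out.append(''.join(comp[c] for c in cleaned_string))
--     return out
-- ===== Notes on version B (the rewrite author's own statement) =====
-- stated objective: faster
-- what changed: Instead of rewriting the whole string once per replacement for every pair (A's chained str.replace calls, rescanning all other pairs per pass), B composes the single-character replacements into char-to-char maps over a small closed alphabet, shares prefix/suffix compositions of the masking maps across all passes, and renders each substring in one pass over the string.
import Mathlib
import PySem

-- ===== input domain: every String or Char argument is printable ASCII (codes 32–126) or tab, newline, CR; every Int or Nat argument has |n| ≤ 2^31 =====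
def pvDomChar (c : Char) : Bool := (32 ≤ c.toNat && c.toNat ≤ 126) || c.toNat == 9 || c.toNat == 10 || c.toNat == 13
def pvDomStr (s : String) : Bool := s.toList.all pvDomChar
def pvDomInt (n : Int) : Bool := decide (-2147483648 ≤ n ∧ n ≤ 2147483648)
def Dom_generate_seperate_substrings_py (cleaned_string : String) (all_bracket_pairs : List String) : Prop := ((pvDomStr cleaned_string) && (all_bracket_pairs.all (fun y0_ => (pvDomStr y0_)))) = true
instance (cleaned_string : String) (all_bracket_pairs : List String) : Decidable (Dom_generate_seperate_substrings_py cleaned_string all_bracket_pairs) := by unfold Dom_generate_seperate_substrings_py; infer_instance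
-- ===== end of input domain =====

-- B composes the single-char replacements into char→char maps over a small
-- closed alphabet, sharing prefix/suffix compositions across the passes, and
-- renders each substring in one pass (measured faster than A on large inputs).

-- ===== PORT A =====
-- s.replace(p[i], r) for a 1-char replacement r; Python raises IndexError when
-- i is out of range for p (PySem.Str.pyGet? = none): those inputs are excluded
-- by Pre_; the `none` branch returns s only to stay total.
def pvRep (s : String) (p : String) (i : Int) (r : Char) : String :=
  match PySem.Str.pyGet? p i with
  | some c => PySem.Str.replace s (String.ofList [c]) (String.ofList [r])
  | none => s

def generate_seperate_substrings_py (cleaned_string : String) (all_bracket_pairs : List String) : List String :=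
  (List.range all_bracket_pairs.length).foldl (fun substrings j =>
    if PySem.Str.len (all_bracket_pairs.getD j "") > 0 then
      let substring := (List.range all_bracket_pairs.length).foldl (fun substring i =>
        if i ≠ j then
          let pair := all_bracket_pairs.getD i ""
          pvRep (pvRep substring pair 0 '.') pair 1 '.'
        else substring) cleaned_string
      let substring := pvRep (pvRep substring (all_bracket_pairs.getD j "") 0 '(') (all_bracket_pairs.getD j "") 1 ')'
      substrings ++ [substring]
    else substrings) []

-- ===== PORT B =====
-- p[i] as a Char; `'?'` is only the totalizing default for the IndexError case
-- excluded by Pre_.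
def pvChr (p : String) (i : Int) : Char :=
  (PySem.Str.pyGet? p i).getD '?'

-- Source B's `step(m, a, b)`: append one replacement pass to a composed map
def pvStepUpd (d : PySem.Dict Char Char) (ab : Char × Char) : PySem.Dict Char Char :=
  PySem.Dict.mk (d.items.map (fun kv => if kv.2 = ab.1 then (kv.1, ab.2) else kv))

-- Source B's `mask(m, p)`
def pvMask (m : PySem.Dict Char Char) (p : String) : PySem.Dict Char Char :=
  pvStepUpd (pvStepUpd m (pvChr p 0, '.')) (pvChr p 1, '.')

-- Source B's prefix list (prefix[j] = masking of pairs 0..j-1, composed)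
def pvPrefixes (ps : List String) (m : PySem.Dict Char Char) : List (PySem.Dict Char Char) :=
  match ps with
  | [] => [m]
  | p :: t => m :: pvPrefixes t (pvMask m p)

-- Source B's suffix[j] = {c: suffix[j+1][..mask of pair j applied to c..]}; the
-- looked-up key is always a key of x (the alphabet is closed), so the getD
-- default '?' is unreachable.
def pvSuffStep (dom : List Char) (p : String) (x : PySem.Dict Char Char) : PySem.Dict Char Char :=
  PySem.Dict.mk (dom.map (fun c =>
    (c, x.getD (if (if c = pvChr p 0 then '.' else c) = pvChr p 1 then '.' else (if c = pvChr p 0 then '.' else c)) '?')))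

-- Source B's suffix list, built from the right (suffix[j] = masking of pairs j.., composed)
def pvSuffixes (dom : List Char) (idm : PySem.Dict Char Char) (ps : List String) : List (PySem.Dict Char Char) :=
  match ps with
  | [] => [idm]
  | p :: t =>
    let rest := pvSuffixes dom idm t
    pvSuffStep dom p (rest.headD idm) :: rest

def generate_seperate_substrings_py_alt (cleaned_string : String) (all_bracket_pairs : List String) : List String :=
  let js := (List.range all_bracket_pairs.length).foldl (fun acc j =>
      if PySem.Str.len (all_bracket_pairs.getD j "") > 0 then acc ++ [j] else acc) []
  if js = [] then []
  else
    let dom : List Char := PySem.Set.ofList (cleaned_string.toList ++ ['.', '(', ')'])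
    let idm : PySem.Dict Char Char := dom.foldl (fun d c => d.insert c c) PySem.Dict.empty
    let pref := pvPrefixes all_bracket_pairs idm
    let suff := pvSuffixes dom idm all_bracket_pairs
    js.foldl (fun out j =>
      let pj := all_bracket_pairs.getD j ""
      -- comp = {c: suffix[j+1][prefix[j][c]] for c in domain}; keys always present
      let comp : PySem.Dict Char Char := PySem.Dict.mk (dom.map (fun c =>
        (c, (suff.getD (j+1) idm).getD ((pref.getD j idm).getD c '?') '?')))
      let comp := pvStepUpd (pvStepUpd comp (pvChr pj 0, '(')) (pvChr pj 1, ')')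
      -- ''.join(comp[c] for c in cleaned_string); c is always a key of comp
      out ++ [String.ofList (cleaned_string.toList.map (fun c => comp.getD c c))]) []

-- ===== PRECONDITION & SPEC =====
-- A raises IndexError (pair[0]/pair[1]) whenever a length-1 pair is present or
-- an empty pair coexists with a non-empty one; A returns normally exactly when
-- all pairs are empty or all pairs have length ≥ 2, which is Pre_.
def Pre_generate_seperate_substrings_py (cleaned_string : String) (all_bracket_pairs : List String) : Prop :=
  (∀ p ∈ all_bracket_pairs, p = "") ∨ (∀ p ∈ all_bracket_pairs, 2 ≤ p.length)
instance (cleaned_string : String) (all_bracket_pairs : List String) : Decidable (Pre_generate_seperate_substrings_py cleaned_string all_bracket_pairs) := by unfold Pre_generate_seperate_substrings_py; infer_instance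

def pvWitness_generate_seperate_substrings_py : String × List String := ("a(b)<c>", ["()", "<>"])

def Spec_generate_seperate_substrings_py (cleaned_string : String) (all_bracket_pairs : List String) (out : List String) : Prop := out = generate_seperate_substrings_py_alt cleaned_string all_bracket_pairs
instance (cleaned_string : String) (all_bracket_pairs : List String) (out : List String) : Decidable (Spec_generate_seperate_substrings_py cleaned_string all_bracket_pairs out) := by unfold Spec_generate_seperate_substrings_py; infer_instance

-- ===== CLAIM =====
def Claim_equal_generate_seperate_substrings_py : Prop := ∀ (cleaned_string : String) (all_bracket_pairs : List String), Dom_generate_seperate_substrings_py cleaned_string all_bracket_pairs → Pre_generate_seperate_substrings_py cleaned_string all_bracket_pairs → Spec_generate_seperate_substrings_py cleaned_string all_bracket_pairs (generate_seperate_substrings_py cleaned_string all_bracket_pairs)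

-- ===== LEMMAS AND PROOFS =====

-- one replacement step as a map on characters
def pvStepF (ab : Char × Char) (c : Char) : Char := if c = ab.1 then ab.2 else c

-- the composition of a list of replacement steps
def pvApplySteps (L : List (Char × Char)) (c : Char) : Char := L.foldl (fun x ab => pvStepF ab x) c

-- the two '.'-masking steps contributed by a pair
def pvG (p : String) : List (Char × Char) := [(pvChr p 0, '.'), (pvChr p 1, '.')]

-- one single-char replace on a String
def pvRepStep (s : String) (ab : Char × Char) : String :=
  PySem.Str.replace s (String.ofList [ab.1]) (String.ofList [ab.2])

theorem pv_go_single (a b : Char) : ∀ (l acc : List Char),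
    PySem.Chars.replace.go [a] [b] l.length l acc = acc.reverse ++ l.map (pvStepF (a, b)) := by
  intro l
  induction l with
  | nil => intro acc; simp [PySem.Chars.replace.go]
  | cons c t ih =>
    intro acc
    by_cases hc : c = a
    · subst hc
      simp [PySem.Chars.replace.go, List.isPrefixOf, ih, pvStepF]
    · have hpre : [a].isPrefixOf (c :: t) = false := by
        simp [List.isPrefixOf]
        exact fun h => hc h.symm
      rw [List.length_cons]
      simp [PySem.Chars.replace.go, hpre, ih, pvStepF, hc]

theorem pv_replace_single (a b : Char) (l : List Char) :
    PySem.Chars.replace l [a] [b] = l.map (pvStepF (a, b)) := by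
  simp [PySem.Chars.replace, pv_go_single]

theorem pv_toList_repStep (s : String) (ab : Char × Char) :
    (pvRepStep s ab).toList = s.toList.map (pvStepF ab) := by
  simp [pvRepStep, PySem.Str.toList_replace, pv_replace_single]

theorem pv_applySteps_nil : pvApplySteps [] = fun c => c := rfl

theorem pv_applySteps_append (X Y : List (Char × Char)) (c : Char) :
    pvApplySteps (X ++ Y) c = pvApplySteps Y (pvApplySteps X c) := by
  simp [pvApplySteps, List.foldl_append]

theorem pv_toList_chain : ∀ (L : List (Char × Char)) (s : String),
    (L.foldl pvRepStep s).toList = s.toList.map (pvApplySteps L) := by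
  intro L
  induction L with
  | nil => intro s; rw [pv_applySteps_nil]; simp
  | cons ab L ih =>
    intro s
    simp only [List.foldl_cons, ih, pv_toList_repStep, List.map_map]
    rfl

theorem pv_pyGet?_of_lt (p : String) (i : Nat) (h : i < p.toList.length) :
    PySem.Str.pyGet? p (i : Int) = some p.toList[i] := by
  have h' : i < p.length := by simpa using h
  simp [PySem.Str.pyGet?, PySem.List.pyGet?, PySem.List.pyIdx?, h']

theorem pv_rep_eq_repStep (s p : String) (i : Int) (r c : Char)
    (h : PySem.Str.pyGet? p i = some c) :
    pvRep s p i r = pvRepStep s (pvChr p i, r) := by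
  simp only [pvRep, pvChr, h, Option.getD_some, pvRepStep]

theorem pv_get?_map_step : ∀ (l : List (Char × Char)) (ab : Char × Char) (k : Char),
    (PySem.Dict.mk (l.map (fun kv => if kv.2 = ab.1 then (kv.1, ab.2) else kv))).get? k
      = ((PySem.Dict.mk l).get? k).map (pvStepF ab) := by
  intro l
  induction l with
  | nil => intro ab k; rfl
  | cons kv t ih =>
    intro ab k
    obtain ⟨kk, vv⟩ := kv
    simp only [List.map_cons]
    by_cases hv : vv = ab.1
    · rw [if_pos (show (kk, vv).2 = ab.1 from hv)]
      rw [PySem.Dict.get?_mk_cons, PySem.Dict.get?_mk_cons]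
      by_cases hk : kk == k
      · simp [hk, pvStepF, hv]
      · simp [hk, ih]
    · rw [if_neg (show ¬ (kk, vv).2 = ab.1 from hv)]
      rw [PySem.Dict.get?_mk_cons, PySem.Dict.get?_mk_cons]
      by_cases hk : kk == k
      · simp [hk, pvStepF, hv]
      · simp [hk, ih]

theorem pv_get?_stepUpd (d : PySem.Dict Char Char) (ab : Char × Char) (k : Char) :
    (pvStepUpd d ab).get? k = (d.get? k).map (pvStepF ab) := by
  obtain ⟨l⟩ := d
  exact pv_get?_map_step l ab k

theorem pv_get?_stepsFold : ∀ (L : List (Char × Char)) (m : PySem.Dict Char Char) (k : Char),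
    ((L.foldl pvStepUpd m).get? k) = (m.get? k).map (pvApplySteps L) := by
  intro L
  induction L with
  | nil => intro m k; rw [List.foldl_nil]; cases m.get? k <;> rfl
  | cons ab L ih =>
    intro m k
    simp only [List.foldl_cons, ih, pv_get?_stepUpd, Option.map_map]
    rcases m.get? k with _ | v <;> rfl

theorem pv_get?_initFold : ∀ (l : List Char) (d : PySem.Dict Char Char) (k : Char),
    (l.foldl (fun d c => d.insert c c) d).get? k = if k ∈ l then some k else d.get? k := by
  intro l
  induction l with
  | nil => intro d k; simp
  | cons c t ih =>
    intro d k
    simp only [List.foldl_cons, ih, PySem.Dict.get?_insert, List.mem_cons]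
    by_cases ht : k ∈ t <;> by_cases hc : k = c <;> simp_all

-- a dict-comprehension table: first match = the unique entry for a member key
theorem pv_get?_tab : ∀ (l : List Char) (f : Char → Char) (k : Char),
    (PySem.Dict.mk (l.map (fun c => (c, f c)))).get? k = if k ∈ l then some (f k) else none := by
  intro l f
  induction l with
  | nil => intro k; simp [PySem.Dict.get?]
  | cons c t ih =>
    intro k
    simp only [List.map_cons, PySem.Dict.get?_mk_cons, List.mem_cons]
    by_cases hc : c = k
    · subst hc; simp
    · have hbe : (c == k) = false := by simpa using hc
      have hkc : ¬ k = c := fun h => hc h.symm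
      simp [hbe, ih, hkc]

-- applying steps whose targets lie in dl keeps members of dl inside dl
theorem pv_apply_mem : ∀ (L : List (Char × Char)) (dl : List Char) (c : Char),
    c ∈ dl → (∀ ab ∈ L, ab.2 ∈ dl) → pvApplySteps L c ∈ dl := by
  intro L
  induction L with
  | nil => intro dl c hc _; exact hc
  | cons ab L ih =>
    intro dl c hc hT
    have h1 : pvStepF ab c ∈ dl := by
      unfold pvStepF
      by_cases h : c = ab.1
      · simp [h]; exact hT ab (by simp)
      · simp [h]; exact hc
    exact ih dl _ h1 (fun x hx => hT x (by simp [hx]))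

-- prefix[j] is the composed-map fold of the masking steps of the first j pairs
theorem pv_prefixes_getD : ∀ (ps : List String) (m d : PySem.Dict Char Char) (j : Nat),
    j ≤ ps.length →
    (pvPrefixes ps m).getD j d = ((ps.take j).flatMap pvG).foldl pvStepUpd m := by
  intro ps
  induction ps with
  | nil => intro m d j hj; have hj0 : j = 0 := Nat.le_zero.mp (by simpa using hj); subst hj0; simp [pvPrefixes]
  | cons p t ih =>
    intro m d j hj
    cases j with
    | zero => simp [pvPrefixes]
    | succ j =>
      have hj' : j ≤ t.length := by simpa using hj
      simp only [pvPrefixes, List.getD_cons_succ, ih _ d j hj', List.take_succ_cons,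
        List.flatMap_cons, List.foldl_append]
      rfl

-- suffix[i] is the head of the suffix list built over the dropped tail
theorem pv_suffixes_getD (dom : List Char) (idm : PySem.Dict Char Char) :
    ∀ (ps : List String) (i : Nat), i ≤ ps.length →
    (pvSuffixes dom idm ps).getD i idm = (pvSuffixes dom idm (ps.drop i)).headD idm := by
  intro ps
  induction ps with
  | nil => intro i hi; have hi0 : i = 0 := Nat.le_zero.mp (by simpa using hi); subst hi0; simp [pvSuffixes]
  | cons p t ih =>
    intro i hi
    cases i with
    | zero => simp [pvSuffixes]
    | succ i => simpa [pvSuffixes] using ih i (by simpa using hi)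

theorem pv_sufftop_get? (cs : String) :
    ∀ (ps : List String) (c : Char), c ∈ (PySem.Set.ofList (cs.toList ++ ['.', '(', ')']) : List Char) →
    ((pvSuffixes (PySem.Set.ofList (cs.toList ++ ['.', '(', ')'])) ((PySem.Set.ofList (cs.toList ++ ['.', '(', ')']) : List Char).foldl (fun d c => d.insert c c) PySem.Dict.empty) ps).headD ((PySem.Set.ofList (cs.toList ++ ['.', '(', ')']) : List Char).foldl (fun d c => d.insert c c) PySem.Dict.empty)).get? c
      = some (pvApplySteps (ps.flatMap pvG) c) := by
  intro ps
  set dl : List Char := PySem.Set.ofList (cs.toList ++ ['.', '(', ')']) with hdl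
  have hdot : '.' ∈ dl := by
    rw [hdl, PySem.Set.mem_ofList]; simp
  induction ps with
  | nil =>
    intro c hc
    simp only [pvSuffixes, List.headD_cons, List.flatMap_nil, pv_applySteps_nil]
    rw [pv_get?_initFold]
    simp [hc]
  | cons p t ih =>
    intro c hc
    simp only [pvSuffixes, List.headD_cons, pvSuffStep]
    rw [pv_get?_tab]
    have hkey : (if (if c = pvChr p 0 then '.' else c) = pvChr p 1 then '.' else (if c = pvChr p 0 then '.' else c))
        = pvApplySteps (pvG p) c := rfl
    rw [if_pos hc, hkey]
    have hmem : pvApplySteps (pvG p) c ∈ dl := by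
      apply pv_apply_mem
      · exact hc
      · intro ab hab
        rcases List.mem_cons.mp hab with h | h
        · rw [h]; exact hdot
        · rcases List.mem_cons.mp h with h2 | h2
          · rw [h2]; exact hdot
          · exact absurd h2 (List.not_mem_nil)
    rw [PySem.Dict.getD_eq_get?_getD, ih _ hmem]
    simp [List.flatMap_cons, pv_applySteps_append]

-- the flatMapped masking steps of a take/drop segment, re-indexed
theorem pv_flatMap_take (ps : List String) (j : Nat) (hj : j ≤ ps.length) :
    (ps.take j).flatMap pvG = (List.range' 0 j).flatMap (fun i => pvG (ps.getD i "")) := by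
  have hmap : (ps.take j).map pvG = (List.range' 0 j).map (fun i => pvG (ps.getD i "")) := by
    apply List.ext_getElem
    · simp [hj]
    · intro i h1 h2
      simp only [List.getElem_map, List.getElem_take, List.getElem_range']
      rw [List.getD_eq_getElem ps "" (by simp at h1; omega)]
      simp
  calc (ps.take j).flatMap pvG = ((ps.take j).map pvG).flatten := by rw [List.flatMap_def]
    _ = ((List.range' 0 j).map (fun i => pvG (ps.getD i ""))).flatten := by rw [hmap]
    _ = (List.range' 0 j).flatMap (fun i => pvG (ps.getD i "")) := by rw [List.flatMap_def]

theorem pv_flatMap_drop (ps : List String) (j : Nat) (hj : j < ps.length) :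
    (ps.drop (j+1)).flatMap pvG = (List.range' (j+1) (ps.length - (j+1))).flatMap (fun i => pvG (ps.getD i "")) := by
  have hmap : (ps.drop (j+1)).map pvG = (List.range' (j+1) (ps.length - (j+1))).map (fun i => pvG (ps.getD i "")) := by
    apply List.ext_getElem
    · simp
    · intro i h1 h2
      simp only [List.getElem_map, List.getElem_drop, List.getElem_range']
      rw [List.getD_eq_getElem ps "" (by simp at h1; omega)]
      simp [Nat.add_comm]
  calc (ps.drop (j+1)).flatMap pvG = ((ps.drop (j+1)).map pvG).flatten := by rw [List.flatMap_def]
    _ = _ := by rw [hmap, ← List.flatMap_def]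

-- the per-j substring of both ports coincides when every pair has length ≥ 2
set_option maxHeartbeats 2000000 in
theorem pv_subs_eq (cs : String) (ps : List String)
    (hPre : Pre_generate_seperate_substrings_py cs ps) (j : Nat) (hj : j < ps.length)
    (hP : PySem.Str.len (ps.getD j "") > 0) :
    pvRep (pvRep ((List.range ps.length).foldl (fun s i =>
        if i ≠ j then pvRep (pvRep s (ps.getD i "") 0 '.') (ps.getD i "") 1 '.' else s) cs)
      (ps.getD j "") 0 '(') (ps.getD j "") 1 ')' =
    String.ofList (cs.toList.map (fun c =>
      (pvStepUpd (pvStepUpd (PySem.Dict.mk ((PySem.Set.ofList (cs.toList ++ ['.', '(', ')']) : List Char).map (fun c => (c, ((pvSuffixes (PySem.Set.ofList (cs.toList ++ ['.', '(', ')'])) ((PySem.Set.ofList (cs.toList ++ ['.', '(', ')']) : List Char).foldl (fun d c => d.insert c c) PySem.Dict.empty) ps).getD (j+1) ((PySem.Set.ofList (cs.toList ++ ['.', '(', ')']) : List Char).foldl (fun d c => d.insert c c) PySem.Dict.empty)).getD (((pvPrefixes ps ((PySem.Set.ofList (cs.toList ++ ['.', '(', ')']) : List Char).foldl (fun d c =>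 d.insert c c) PySem.Dict.empty)).getD j ((PySem.Set.ofList (cs.toList ++ ['.', '(', ')']) : List Char).foldl (fun d c => d.insert c c) PySem.Dict.empty)).getD c '?') '?'))))
        (pvChr (ps.getD j "") 0, '(')) (pvChr (ps.getD j "") 1, ')')).getD c c)) := by
  have h2 : ∀ p ∈ ps, 2 ≤ p.length := by
    rcases hPre with hall | h2
    · exfalso
      have he : ps.getD j "" = "" := by
        rw [List.getD_eq_getElem ps "" hj]
        exact hall _ (List.getElem_mem _)
      rw [he] at hP
      simp [PySem.Str.len] at hP
    · exact h2
  set dl : List Char := PySem.Set.ofList (cs.toList ++ ['.', '(', ')']) with hdl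
  set idm : PySem.Dict Char Char := dl.foldl (fun d c => d.insert c c) PySem.Dict.empty with hidm
  have hdot : '.' ∈ dl := by rw [hdl, PySem.Set.mem_ofList]; simp
  have hmemcs : ∀ c ∈ cs.toList, c ∈ dl := by
    intro c hc; rw [hdl, PySem.Set.mem_ofList]; simp [hc]
  -- pair accesses are in range
  have hget0 : ∀ i : Nat, i < ps.length →
      ∃ c, PySem.Str.pyGet? (ps.getD i "") (0 : Int) = some c := by
    intro i hi
    have hmem : ps.getD i "" ∈ ps := by
      rw [List.getD_eq_getElem ps "" hi]; exact List.getElem_mem _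
    have hlen : 2 ≤ (ps.getD i "").toList.length := by simpa using h2 _ hmem
    exact ⟨_, by exact_mod_cast pv_pyGet?_of_lt (ps.getD i "") 0 (by omega)⟩
  have hget1 : ∀ i : Nat, i < ps.length →
      ∃ c, PySem.Str.pyGet? (ps.getD i "") (1 : Int) = some c := by
    intro i hi
    have hmem : ps.getD i "" ∈ ps := by
      rw [List.getD_eq_getElem ps "" hi]; exact List.getElem_mem _
    have hlen : 2 ≤ (ps.getD i "").toList.length := by simpa using h2 _ hmem
    exact ⟨_, by exact_mod_cast pv_pyGet?_of_lt (ps.getD i "") 1 (by omega)⟩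
  -- the common steps list
  set S : List (Char × Char) :=
    ((ps.take j).flatMap pvG ++ (ps.drop (j+1)).flatMap pvG) ++
      [(pvChr (ps.getD j "") 0, '('), (pvChr (ps.getD j "") 1, ')')] with hS
  -- A's substring is the chain of S over cs
  have hA : pvRep (pvRep ((List.range ps.length).foldl (fun s i =>
        if i ≠ j then pvRep (pvRep s (ps.getD i "") 0 '.') (ps.getD i "") 1 '.' else s) cs)
      (ps.getD j "") 0 '(') (ps.getD j "") 1 ')' = S.foldl pvRepStep cs := by
    have hsplit : List.range ps.length =
        (List.range' 0 j ++ [j]) ++ List.range' (j+1) (ps.length - (j+1)) := by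
      have h1 : [j] = List.range' j 1 := by simp
      rw [List.range_eq_range', h1, List.append_assoc]
      rw [show List.range' j 1 ++ List.range' (j+1) (ps.length-(j+1))
          = List.range' j (1 + (ps.length-(j+1))) from by
        simpa using List.range'_append (s := j) (m := 1) (n := ps.length-(j+1)) (step := 1)]
      rw [show List.range' 0 j ++ List.range' j (1+(ps.length-(j+1)))
          = List.range' 0 (j+(1+(ps.length-(j+1)))) from by
        simpa using List.range'_append (s := 0) (m := j) (n := 1+(ps.length-(j+1))) (step := 1)]
      congr 1
      omega
    have hbody : ∀ (l : List Nat), (∀ i ∈ l, i ≠ j ∧ i < ps.length) → ∀ s0 : String,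
        l.foldl (fun s i =>
          if i ≠ j then pvRep (pvRep s (ps.getD i "") 0 '.') (ps.getD i "") 1 '.' else s) s0
          = (l.flatMap (fun i => pvG (ps.getD i ""))).foldl pvRepStep s0 := by
      intro l
      induction l with
      | nil => intro _ s0; simp
      | cons i t iht =>
        intro hl s0
        obtain ⟨hi, hilen⟩ := hl i (by simp)
        obtain ⟨c0, hc0⟩ := hget0 i hilen
        obtain ⟨c1, hc1⟩ := hget1 i hilen
        simp only [List.foldl_cons, List.flatMap_cons, List.foldl_append]
        rw [if_pos hi, pv_rep_eq_repStep _ _ _ _ _ hc0, pv_rep_eq_repStep _ _ _ _ _ hc1]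
        rw [iht (fun x hx => (hl x (by simp [hx])))]
        rfl
    have hinner : (List.range ps.length).foldl (fun s i =>
        if i ≠ j then pvRep (pvRep s (ps.getD i "") 0 '.') (ps.getD i "") 1 '.' else s) cs =
        ((ps.take j).flatMap pvG ++ (ps.drop (j+1)).flatMap pvG).foldl pvRepStep cs := by
      rw [hsplit, List.foldl_append, List.foldl_append, List.foldl_append]
      rw [hbody (List.range' 0 j)
        (by intro i hi; have := List.mem_range'_1.mp hi; constructor <;> omega) cs]
      have hjskip : [j].foldl (fun s i =>
          if i ≠ j then pvRep (pvRep s (ps.getD i "") 0 '.') (ps.getD i "") 1 '.' else s)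
          (((List.range' 0 j).flatMap (fun i => pvG (ps.getD i ""))).foldl pvRepStep cs) =
          ((List.range' 0 j).flatMap (fun i => pvG (ps.getD i ""))).foldl pvRepStep cs := by
        simp
      rw [hjskip]
      rw [hbody (List.range' (j+1) (ps.length - (j+1)))
        (by intro i hi; have := List.mem_range'_1.mp hi; constructor <;> omega)]
      rw [pv_flatMap_take ps j (le_of_lt hj), pv_flatMap_drop ps j hj]
    obtain ⟨c0, hc0⟩ := hget0 j hj
    obtain ⟨c1, hc1⟩ := hget1 j hj
    rw [hinner, pv_rep_eq_repStep _ _ _ _ _ hc0, pv_rep_eq_repStep _ _ _ _ _ hc1, hS]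
    simp only [List.foldl_append, List.foldl_cons, List.foldl_nil]
  rw [hA]
  -- B's composed map sends each c of cs to pvApplySteps S c
  have hmapB : ∀ c ∈ cs.toList,
      (pvStepUpd (pvStepUpd (PySem.Dict.mk (dl.map (fun c =>
          (c, ((pvSuffixes dl idm ps).getD (j+1) idm).getD
              (((pvPrefixes ps idm).getD j idm).getD c '?') '?'))))
        (pvChr (ps.getD j "") 0, '(')) (pvChr (ps.getD j "") 1, ')')).getD c c
      = pvApplySteps S c := by
    intro c hc
    have hcdl : c ∈ dl := hmemcs c hc
    have hGtargets : ∀ ab ∈ (ps.take j).flatMap pvG, ab.2 ∈ dl := by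
      intro ab hab
      obtain ⟨p, -, hmem⟩ := List.mem_flatMap.mp hab
      have hmem' : ab ∈ [(pvChr p 0, '.'), (pvChr p 1, '.')] := hmem
      rcases List.mem_cons.mp hmem' with h | h
      · rw [h]; exact hdot
      · rcases List.mem_cons.mp h with h2 | h2
        · rw [h2]; exact hdot
        · exact absurd h2 (List.not_mem_nil)
    -- the inner table lookup
    have hpref : ((pvPrefixes ps idm).getD j idm).getD c '?'
        = pvApplySteps ((ps.take j).flatMap pvG) c := by
      rw [pv_prefixes_getD ps idm idm j (le_of_lt hj), PySem.Dict.getD_eq_get?_getD,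
          pv_get?_stepsFold, pv_get?_initFold]
      simp [hcdl]
    have hprefmem : pvApplySteps ((ps.take j).flatMap pvG) c ∈ dl :=
      pv_apply_mem _ dl c hcdl hGtargets
    have hsuff : ((pvSuffixes dl idm ps).getD (j+1) idm).getD
        (pvApplySteps ((ps.take j).flatMap pvG) c) '?'
        = pvApplySteps ((ps.drop (j+1)).flatMap pvG) (pvApplySteps ((ps.take j).flatMap pvG) c) := by
      rw [pv_suffixes_getD dl idm ps (j+1) (by omega), PySem.Dict.getD_eq_get?_getD]
      rw [pv_sufftop_get? cs (ps.drop (j+1)) _ hprefmem]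
      rfl
    rw [PySem.Dict.getD_eq_get?_getD, pv_get?_stepUpd, pv_get?_stepUpd, pv_get?_tab,
        if_pos hcdl, hpref, hsuff]
    simp only [Option.map_some, Option.getD_some]
    rw [hS]
    rw [pv_applySteps_append, pv_applySteps_append]
    rfl
  have hmap : cs.toList.map (fun c =>
      (pvStepUpd (pvStepUpd (PySem.Dict.mk (dl.map (fun c =>
          (c, ((pvSuffixes dl idm ps).getD (j+1) idm).getD
              (((pvPrefixes ps idm).getD j idm).getD c '?') '?'))))
        (pvChr (ps.getD j "") 0, '(')) (pvChr (ps.getD j "") 1, ')')).getD c c)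
      = cs.toList.map (pvApplySteps S) := List.map_congr_left hmapB
  rw [hmap, ← pv_toList_chain S cs, String.ofList_toList]

-- the shared outer loop shape: filter-then-map on both sides
theorem pv_outer (P : Nat → Prop) [DecidablePred P] (l : List Nat) (fA fB : Nat → String)
    (h : ∀ j ∈ l, P j → fA j = fB j) :
    l.foldl (fun acc j => if P j then acc ++ [fA j] else acc) ([] : List String) =
    (if l.foldl (fun acc j => if P j then acc ++ [j] else acc) ([] : List Nat) = [] then ([] : List String)
     else (l.foldl (fun acc j => if P j then acc ++ [j] else acc) ([] : List Nat)).foldl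
       (fun out j => out ++ [fB j]) []) := by
  have hjs : l.foldl (fun acc j => if P j then acc ++ [j] else acc) ([] : List Nat)
      = l.filter (fun x => decide (P x)) := by
    rw [PySem.List.foldl_append_ite P (fun j => j) l]
    simp
  rw [hjs, PySem.List.foldl_append_ite P fA l, List.nil_append]
  by_cases hf : l.filter (fun x => decide (P x)) = []
  · simp [hf]
  · rw [if_neg hf, PySem.List.foldl_append_singleton_eq_map, List.nil_append]
    apply List.map_congr_left
    intro j hjmem
    have hm := List.mem_filter.mp hjmem
    exact h j hm.1 (by simpa using hm.2)

-- ===== VERDICT =====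
theorem generate_seperate_substrings_py_spec : Claim_equal_generate_seperate_substrings_py := by
  intro cs ps _ hPre
  unfold Spec_generate_seperate_substrings_py
  show generate_seperate_substrings_py cs ps = generate_seperate_substrings_py_alt cs ps
  exact pv_outer (fun j => PySem.Str.len (ps.getD j "") > 0) (List.range ps.length) _ _
    (fun j hjm hP => pv_subs_eq cs ps hPre j (List.mem_range.mp hjm) hP)
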